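-- pv_equiv track=rewrite | github.com/Anon0nyx/leetcodeProblems | metaPrep/photographs/slidingWindow.py | count_artistic_photos
-- ===== SOURCE A (Python) =====
-- def count_artistic_photos(N, C, X, Y):
--     photographers = []
--     actors = []
--     backdrops = []
--
--     # Identify positions
--     for i in range(N):
--         if C[i] == 'P':
--             photographers.append(i)
--         elif C[i] == 'A':
--             actors.append(i)
--         elif C[i] == 'B':
--             backdrops.append(i)
--
--     count = 0
--
--     # Check valid ranges using sliding window approach
--     for actor in actors:
--         # Find valid photographers
--         left_index = right_index = 0
--         while left_index < len(photographers) and photographers[left_index] < actor - Y: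
--             left_index += 1
--         while right_index < len(photographers) and photographers[right_index] <= actor - X:
--             right_index += 1
--         valid_photographers = right_index - left_index
--
--         # Find valid backdrops
--         left_index = right_index = 0
--         while left_index < len(backdrops) and backdrops[left_index] <= actor + X:
--             left_index += 1
--         while right_index < len(backdrops) and backdrops[right_index] <= actor + Y:
--             right_index += 1
--         valid_backdrops = right_index - left_index
--
--         # Count valid combinations
--         count += valid_photographers * valid_backdrops
--
--     return count
-- ===== SOURCE B (Python) =====
-- def count_artistic_photos(N, C, X, Y):
--     # One pass builds prefix counts of 'P' and 'B'; each actor query is O(1).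
--     prefP = [0]
--     prefB = [0]
--     p = b = 0
--     for i in range(N):
--         if C[i] == 'P':
--             p += 1
--         elif C[i] == 'B':
--             b += 1
--         prefP.append(p)
--         prefB.append(b)
--
--     def clamp(j):
--         return min(max(j, 0), N)
--
--     total = 0
--     for i in range(N):
--         if C[i] == 'A':
--             vp = prefP[clamp(i - X + 1)] - prefP[clamp(i - Y)]
--             vb = prefB[clamp(i + Y + 1)] - prefB[clamp(i + X + 1)]
--             total += vp * vb
--     return total
-- ===== Notes on version B (the rewrite author's own statement) =====
-- stated objective: alternative
-- what changed: B replaces A's per-actor linear scans over the photographer/backdrop position lists with two prefix-count arrays built in one pass, each actor's range count becoming a difference of two clamped prefix lookups.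
import Mathlib
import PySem

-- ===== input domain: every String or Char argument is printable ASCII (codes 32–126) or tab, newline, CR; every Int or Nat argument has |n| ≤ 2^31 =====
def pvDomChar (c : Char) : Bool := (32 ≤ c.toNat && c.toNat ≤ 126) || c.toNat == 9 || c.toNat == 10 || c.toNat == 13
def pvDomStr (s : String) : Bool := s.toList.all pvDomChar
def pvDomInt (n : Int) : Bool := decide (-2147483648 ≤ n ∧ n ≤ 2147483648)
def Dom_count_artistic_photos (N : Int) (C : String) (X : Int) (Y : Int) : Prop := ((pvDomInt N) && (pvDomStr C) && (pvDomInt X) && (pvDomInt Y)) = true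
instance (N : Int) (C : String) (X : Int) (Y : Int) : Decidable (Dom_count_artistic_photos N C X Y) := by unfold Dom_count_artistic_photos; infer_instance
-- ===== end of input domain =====

-- B replaces A's per-actor linear scans over the photographer/backdrop position lists with
-- prefix-count arrays queried at clamped indices (objective: alternative).

-- C[i] as a Char (the .getD default is never reached under Pre_: 0 ≤ i < N ≤ len(C))
def pvAt (C : String) (i : Int) : Char := (PySem.Str.pyGet? C i).getD ' '

-- ===== PORT A =====
-- A's first loop: classify positions into (photographers, actors, backdrops)
def pvScan (N : Int) (C : String) : List Int × List Int × List Int :=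
  (PySem.List.pyRange 0 N 1).foldl
    (fun s i =>
      if pvAt C i = 'P' then (s.1 ++ [i], s.2.1, s.2.2)
      else if pvAt C i = 'A' then (s.1, s.2.1 ++ [i], s.2.2)
      else if pvAt C i = 'B' then (s.1, s.2.1, s.2.2 ++ [i])
      else s)
    ([], [], [])

-- 'idx = 0; while idx < len(l) and p(l[idx]): idx += 1' — idx stops at the first element
-- violating p, i.e. at the length of the initial segment of l satisfying p
def pvCountWhile (l : List Int) (p : Int → Bool) : Int := ((l.takeWhile p).length : Int)

def count_artistic_photos (N : Int) (C : String) (X : Int) (Y : Int) : Int :=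
  let s := pvScan N C
  s.2.1.foldl
    (fun count a =>
      count + (pvCountWhile s.1 (fun x => x ≤ a - X) - pvCountWhile s.1 (fun x => x < a - Y)) *
              (pvCountWhile s.2.2 (fun x => x ≤ a + Y) - pvCountWhile s.2.2 (fun x => x ≤ a + X)))
    0

-- ===== PORT B =====
-- B's first loop: running counters p, b and the two prefix lists (state: prefP, prefB, p, b)
def pvPref (N : Int) (C : String) : List Int × List Int × Int × Int :=
  (PySem.List.pyRange 0 N 1).foldl
    (fun s i =>
      let pb := if pvAt C i = 'P' then (s.2.2.1 + 1, s.2.2.2)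
                else if pvAt C i = 'B' then (s.2.2.1, s.2.2.2 + 1)
                else (s.2.2.1, s.2.2.2)
      (s.1 ++ [pb.1], s.2.1 ++ [pb.2], pb.1, pb.2))
    ([0], [0], 0, 0)

def pvClamp (N : Int) (j : Int) : Int := min (max j 0) N

-- l[j] (index always in range where B uses it: 0 ≤ clamp(j) ≤ N < len(prefix list))
def pvIx (l : List Int) (j : Int) : Int := PySem.List.pyGetD l j 0

def count_artistic_photos_alt (N : Int) (C : String) (X : Int) (Y : Int) : Int :=
  let s := pvPref N C
  (PySem.List.pyRange 0 N 1).foldl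
    (fun total i =>
      if pvAt C i = 'A' then
        total + (pvIx s.1 (pvClamp N (i - X + 1)) - pvIx s.1 (pvClamp N (i - Y))) *
                (pvIx s.2.1 (pvClamp N (i + Y + 1)) - pvIx s.2.1 (pvClamp N (i + X + 1)))
      else total)
    0

-- ===== PRECONDITION & SPEC =====
-- Pre_ excludes exactly the inputs where A raises IndexError (C[i] with N > len(C)); B raises there too.
def Pre_count_artistic_photos (N : Int) (C : String) (X : Int) (Y : Int) : Prop :=
  N ≤ (C.toList.length : Int)
instance (N : Int) (C : String) (X : Int) (Y : Int) : Decidable (Pre_count_artistic_photos N C X Y) := by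
  unfold Pre_count_artistic_photos; infer_instance

def pvWitness_count_artistic_photos : Int × String × Int × Int := (3, "PAB", 0, 2)

def Spec_count_artistic_photos (N : Int) (C : String) (X : Int) (Y : Int) (out : Int) : Prop := out = count_artistic_photos_alt N C X Y
instance (N : Int) (C : String) (X : Int) (Y : Int) (out : Int) : Decidable (Spec_count_artistic_photos N C X Y out) := by unfold Spec_count_artistic_photos; infer_instance

-- ===== CLAIM (what is proved, stated in full; the proofs are below) =====
def Claim_equal_count_artistic_photos : Prop := ∀ (N : Int) (C : String) (X : Int) (Y : Int), Dom_count_artistic_photos N C X Y → Pre_count_artistic_photos N C X Y → Spec_count_artistic_photos N C X Y (count_artistic_photos N C X Y)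

-- ===== LEMMAS AND PROOFS =====

-- character at natural position k, list view
def pvG (cs : List Char) (k : Nat) : Char := cs.getD k ' '

-- positions (< n) holding character ch, as Ints, in order
def pvPos (cs : List Char) (n : Nat) (ch : Char) : List Int :=
  ((List.range n).filter (fun k => pvG cs k = ch)).map (fun k : Nat => (k : Int))

-- number of positions < j holding ch
def pvCnt (cs : List Char) (j : Nat) (ch : Char) : Nat :=
  (List.range j).countP (fun k => pvG cs k = ch)

theorem pvAt_natCast (C : String) (k : Nat) : pvAt C (k : Int) = pvG C.toList k := by
  simp [pvAt, pvG, List.getD]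

theorem pvScan_range (C : String) (n : Nat) :
    (List.range n).foldl
      (fun (s : List Int × List Int × List Int) (k : Nat) =>
        if pvG C.toList k = 'P' then (s.1 ++ [(k:Int)], s.2.1, s.2.2)
        else if pvG C.toList k = 'A' then (s.1, s.2.1 ++ [(k:Int)], s.2.2)
        else if pvG C.toList k = 'B' then (s.1, s.2.1, s.2.2 ++ [(k:Int)])
        else s)
      ([], [], [])
    = (pvPos C.toList n 'P', pvPos C.toList n 'A', pvPos C.toList n 'B') := by
  induction n with
  | zero => simp [pvPos]
  | succ n ih =>
    rw [List.range_succ, List.foldl_append, ih]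
    simp only [List.foldl_cons, List.foldl_nil, pvPos, List.range_succ, List.filter_append]
    split_ifs with h1 h2 h3 <;> simp_all

theorem pvScan_eq (N : Int) (C : String) (hN : 0 ≤ N) :
    pvScan N C = (pvPos C.toList N.toNat 'P', pvPos C.toList N.toNat 'A', pvPos C.toList N.toNat 'B') := by
  have hN' : N = ((N.toNat : Nat) : Int) := by omega
  rw [pvScan, hN', PySem.List.pyRange_zero_natCast, List.foldl_map]
  simp only [pvAt_natCast]
  exact pvScan_range C N.toNat

theorem pvCnt_succ (cs : List Char) (j : Nat) (ch : Char) :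
    pvCnt cs (j + 1) ch = pvCnt cs j ch + (if pvG cs j = ch then 1 else 0) := by
  simp [pvCnt, List.range_succ, List.countP_append, List.countP_cons]

theorem pvPref_range (C : String) (n : Nat) :
    (List.range n).foldl
      (fun (s : List Int × List Int × Int × Int) (k : Nat) =>
        let pb := if pvG C.toList k = 'P' then (s.2.2.1 + 1, s.2.2.2)
                  else if pvG C.toList k = 'B' then (s.2.2.1, s.2.2.2 + 1)
                  else (s.2.2.1, s.2.2.2)
        (s.1 ++ [pb.1], s.2.1 ++ [pb.2], pb.1, pb.2))
      ([0], [0], 0, 0)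
    = ((List.range (n + 1)).map (fun j => (pvCnt C.toList j 'P' : Int)),
       (List.range (n + 1)).map (fun j => (pvCnt C.toList j 'B' : Int)),
       (pvCnt C.toList n 'P' : Int), (pvCnt C.toList n 'B' : Int)) := by
  induction n with
  | zero => simp [pvCnt]
  | succ n ih =>
    rw [List.range_succ, List.foldl_append, ih]
    simp only [List.foldl_cons, List.foldl_nil]
    conv_rhs => rw [List.range_succ]
    simp only [List.map_append, List.map_cons, List.map_nil, pvCnt_succ (cs := C.toList) (j := n)]
    split_ifs with h1 h2 <;> simp_all [Prod.ext_iff]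

theorem pvPref_eq (N : Int) (C : String) (hN : 0 ≤ N) :
    (pvPref N C).1 = (List.range (N.toNat + 1)).map (fun j => (pvCnt C.toList j 'P' : Int)) ∧
    (pvPref N C).2.1 = (List.range (N.toNat + 1)).map (fun j => (pvCnt C.toList j 'B' : Int)) := by
  have hN' : N = ((N.toNat : Nat) : Int) := by omega
  rw [pvPref, hN', PySem.List.pyRange_zero_natCast, List.foldl_map]
  simp only [pvAt_natCast]
  rw [pvPref_range C N.toNat]
  simp
  have h : (max N 0).toNat = N.toNat := by omega
  exact ⟨by rw [h], by rw [h]⟩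

theorem takeWhile_eq_filter_of_sorted (p : Int → Bool)
    (hp : ∀ x y : Int, x ≤ y → p y = true → p x = true) :
    ∀ l : List Int, l.Pairwise (· ≤ ·) → l.takeWhile p = l.filter p := by
  intro l hl
  induction l with
  | nil => rfl
  | cons a l ih =>
    rcases List.pairwise_cons.mp hl with ⟨ha, hl'⟩
    by_cases h : p a = true
    · rw [List.takeWhile_cons_of_pos h, List.filter_cons_of_pos h, ih hl']
    · rw [List.takeWhile_cons_of_neg h, List.filter_cons_of_neg h]
      symm; rw [List.filter_eq_nil_iff]
      intro x hx hpx
      exact h (hp a x (ha x hx) hpx)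

theorem pvPos_pairwise (cs : List Char) (n : Nat) (ch : Char) :
    (pvPos cs n ch).Pairwise (· ≤ ·) := by
  rw [pvPos]
  apply List.Pairwise.map (R := fun (a b : Nat) => a < b)
  · intro a b hab; exact_mod_cast Nat.le_of_lt hab
  · exact (List.pairwise_lt_range).filter _

theorem pvCountWhile_eq (cs : List Char) (n : Nat) (ch : Char) (p : Int → Bool)
    (hp : ∀ x y : Int, x ≤ y → p y = true → p x = true) :
    pvCountWhile (pvPos cs n ch) p =
      (((List.range n).countP (fun k => pvG cs k = ch ∧ p (k : Int))) : Int) := by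
  rw [pvCountWhile, takeWhile_eq_filter_of_sorted p hp _ (pvPos_pairwise cs n ch)]
  rw [pvPos, ← List.countP_eq_length_filter, List.countP_map, List.countP_filter]
  congr 1
  apply List.countP_congr
  intro k _
  simp [Function.comp]
  tauto

theorem range_countP_lt (m n : Nat) (hmn : m ≤ n) (A : Nat → Bool) :
    (List.range n).countP (fun k => A k && decide (k < m)) = (List.range m).countP A := by
  obtain ⟨d, rfl⟩ : ∃ d, n = m + d := ⟨n - m, by omega⟩
  rw [List.range_add, List.countP_append]
  have h2 : ((List.range d).map (m + ·)).countP (fun k => A k && decide (k < m)) = 0 := by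
    rw [List.countP_eq_zero]
    intro x hx
    simp at hx ⊢
    rcases hx with ⟨j, hj, rfl⟩
    omega
  rw [h2, Nat.add_zero]
  apply List.countP_congr
  intro k hk
  simp at hk ⊢
  omega

theorem pvCnt_clamp (cs : List Char) (n : Nat) (ch : Char) (v : Int) :
    (((List.range n).countP (fun k => pvG cs k = ch ∧ (k : Int) ≤ v)) : Int) =
      (pvCnt cs (pvClamp n (v + 1)).toNat ch : Int) := by
  have hm : (pvClamp n (v + 1)).toNat ≤ n := by simp [pvClamp]
  rw [pvCnt, ← range_countP_lt _ n hm (fun k => decide (pvG cs k = ch))]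
  congr 1
  apply List.countP_congr
  intro k hk
  simp at hk ⊢
  intro _
  simp [pvClamp]
  omega

theorem pvCnt_clamp_lt (cs : List Char) (n : Nat) (ch : Char) (v : Int) :
    (((List.range n).countP (fun k => pvG cs k = ch ∧ (k : Int) < v)) : Int) =
      (pvCnt cs (pvClamp n v).toNat ch : Int) := by
  have hm : (pvClamp n v).toNat ≤ n := by simp [pvClamp]
  rw [pvCnt, ← range_countP_lt _ n hm (fun k => decide (pvG cs k = ch))]
  congr 1
  apply List.countP_congr
  intro k hk
  simp at hk ⊢
  intro _
  simp [pvClamp]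
  omega

theorem pvIx_pref (cs : List Char) (n : Nat) (ch : Char) (j : Int)
    (h0 : 0 ≤ j) (h1 : j ≤ (n : Int)) :
    pvIx ((List.range (n + 1)).map (fun j => (pvCnt cs j ch : Int))) j = (pvCnt cs j.toNat ch : Int) := by
  rw [pvIx, PySem.List.pyGetD_eq_getElem _ 0 h0 (by simp; omega)]
  simp

theorem sum_map_filter_eq (q : Nat → Bool) (F : Nat → Int) (l : List Nat) :
    ((l.filter q).map F).sum = (l.map (fun k => if q k then F k else 0)).sum := by
  induction l with
  | nil => rfl
  | cons a l ih => by_cases h : q a <;> simp [List.filter_cons, h, ih]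

theorem foldl_if_add (q : Nat → Prop) [DecidablePred q] (G : Nat → Int) (l : List Nat) (a : Int) :
    l.foldl (fun t k => if q k then t + G k else t) a
      = a + (l.map (fun k => if q k then G k else 0)).sum := by
  induction l generalizing a with
  | nil => simp
  | cons x l ih => by_cases h : q x <;> simp [h, ih, add_assoc]

theorem pvClamp_nonneg (n : Nat) (j : Int) : 0 ≤ pvClamp (n : Int) j := by
  simp [pvClamp]

theorem sum_map_pos (cs : List Char) (n : Nat) (ch : Char) (F : Int → Int) :
    ((pvPos cs n ch).map F).sum
      = ((List.range n).map (fun k => if pvG cs k = ch then F (k : Int) else 0)).sum := by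
  rw [pvPos, List.map_map, sum_map_filter_eq]
  apply congrArg
  apply List.map_congr_left
  intro k _
  by_cases h : pvG cs k = ch <;> simp [h, Function.comp]

theorem pvClamp_le (n : Nat) (j : Int) : pvClamp (n : Int) j ≤ (n : Int) := by
  simp [pvClamp]

-- ===== VERDICT (by name: the statement is the Claim_ definition above) =====
theorem count_artistic_photos_spec : Claim_equal_count_artistic_photos := by
  unfold Claim_equal_count_artistic_photos
  intro N C X Y _ _
  unfold Spec_count_artistic_photos
  by_cases hN : 0 ≤ N
  case neg =>
    have h : PySem.List.pyRange 0 N 1 = [] := PySem.List.pyRange_one_eq_nil (by omega)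
    simp [count_artistic_photos, count_artistic_photos_alt, pvScan, pvPref, h]
  case pos =>
    obtain ⟨n, rfl⟩ : ∃ n : Nat, N = (n : Int) := ⟨N.toNat, by omega⟩
    -- A side
    rw [count_artistic_photos]
    simp only [pvScan_eq _ C hN, Int.toNat_natCast]
    rw [PySem.List.foldl_add]
    -- B side
    rw [count_artistic_photos_alt]
    simp only [(pvPref_eq _ C hN).1, (pvPref_eq _ C hN).2, Int.toNat_natCast]
    rw [PySem.List.pyRange_zero_natCast, List.foldl_map]
    simp only [pvAt_natCast]
    rw [foldl_if_add]
    -- both are sums over range n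
    rw [sum_map_pos]
    simp only [zero_add]
    refine congrArg (List.sum (α := Int)) (List.map_congr_left ?_)
    intro k _
    by_cases hA : pvG C.toList k = 'A'
    · simp only [hA, if_true]
      rw [pvCountWhile_eq C.toList n 'P' _ (by intro x y hxy h; simp at *; omega),
          pvCountWhile_eq C.toList n 'P' _ (by intro x y hxy h; simp at *; omega),
          pvCountWhile_eq C.toList n 'B' _ (by intro x y hxy h; simp at *; omega),
          pvCountWhile_eq C.toList n 'B' _ (by intro x y hxy h; simp at *; omega)]
      simp only [decide_eq_true_eq]
      rw [pvCnt_clamp C.toList n 'P' ((k : Int) - X),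
          pvCnt_clamp_lt C.toList n 'P' ((k : Int) - Y),
          pvCnt_clamp C.toList n 'B' ((k : Int) + Y),
          pvCnt_clamp C.toList n 'B' ((k : Int) + X)]
      rw [pvIx_pref C.toList n 'P' _ (pvClamp_nonneg _ _) (pvClamp_le _ _),
          pvIx_pref C.toList n 'P' _ (pvClamp_nonneg _ _) (pvClamp_le _ _),
          pvIx_pref C.toList n 'B' _ (pvClamp_nonneg _ _) (pvClamp_le _ _),
          pvIx_pref C.toList n 'B' _ (pvClamp_nonneg _ _) (pvClamp_le _ _)]
    · simp [hA]
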